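-- pv_equiv track=rewrite | github.com/mrkvost/quoridor | quoridor/core.py | _make_blocker_positions
-- ===== SOURCE A (Python) =====
-- UP = 0
--
-- RIGHT = 1
--
-- DOWN = 2
--
-- LEFT = 3
--
-- def _make_blocker_positions(board_size):
--     # assert board_size > 1
--     blocker_positions = {}
--     wall_board_size = board_size - 1
--     for position in range(board_size * board_size):
--         row = position // board_size
--         col = position % board_size
--         blocker_positions[position] = {}
--
--         if row != 0:                # can move up
--             blocker_positions[position][UP] = set()
--             new_row = wall_board_size * (row - 1)
--             if col != 0:
--                 blocker_positions[position][UP].add(new_row + col - 1)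
--             if col != wall_board_size:
--                 blocker_positions[position][UP].add(new_row + col)
--
--         if col != wall_board_size:  # can move right
--             blocker_positions[position][RIGHT] = set()
--             new_row = wall_board_size * row
--             if row != 0:
--                 blocker_positions[position][RIGHT].add(
--                     new_row - wall_board_size + col
--                 )
--             if row != wall_board_size:
--                 blocker_positions[position][RIGHT].add(new_row + col)
--
--         if row != wall_board_size:  # can move down
--             blocker_positions[position][DOWN] = set()
--             new_row = wall_board_size * row
--             if col != 0:
--                 blocker_positions[position][DOWN].add(new_row + col - 1)
--             if col != wall_board_size:
--                 blocker_positions[position][DOWN].add(new_row + col)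
--
--         if col != 0:                # can move left
--             blocker_positions[position][LEFT] = set()
--             new_col = col - 1
--             new_row = wall_board_size * row
--             if row != 0:
--                 blocker_positions[position][LEFT].add(
--                     new_row - wall_board_size + new_col
--                 )
--             if row != wall_board_size:
--                 blocker_positions[position][LEFT].add(new_row + new_col)
--
--     return blocker_positions
-- ===== SOURCE B (Python) =====
-- UP = 0
--
-- RIGHT = 1
--
-- DOWN = 2
--
-- LEFT = 3
--
-- def _make_blocker_positions(board_size):
--     # Two-stage construction: first compute, for each cell, only the walls
--     # below it (DOWN) and to its right (RIGHT); then read each cell's UP set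
--     # off the DOWN set of the cell above it, and its LEFT set off the RIGHT
--     # set of the cell to its left.
--     w = board_size - 1
--     n2 = board_size * board_size
--     down = {}
--     right = {}
--     for position in range(n2):
--         row = position // board_size
--         col = position % board_size
--         if row != w:
--             s = set()
--             if col != 0:
--                 s.add(w * row + col - 1)
--             if col != w:
--                 s.add(w * row + col)
--             down[position] = s
--         if col != w:
--             s = set()
--             if row != 0:
--                 s.add(w * (row - 1) + col)
--             if row != w:
--                 s.add(w * row + col)
--             right[position] = s
--     blocker_positions = {}
--     for position in range(n2):
--         row = position // board_size
--         col = position % board_size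
--         d = {}
--         if row != 0:
--             d[UP] = down[position - board_size]
--         if col != w:
--             d[RIGHT] = right[position]
--         if row != w:
--             d[DOWN] = down[position]
--         if col != 0:
--             d[LEFT] = right[position - 1]
--         blocker_positions[position] = d
--     return blocker_positions
-- ===== Notes on version B (the rewrite author's own statement) =====
-- stated objective: alternative
-- what changed: B is a two-stage construction: a first pass computes only each cell's DOWN and RIGHT wall sets into two tables, and a second pass assembles every cell's direction dict by reading UP from the DOWN set of the cell above and LEFT from the RIGHT set of the cell to the left, instead of A's single pass that derives all four sets per cell with hand-specialized arithmetic.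
import Mathlib
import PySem

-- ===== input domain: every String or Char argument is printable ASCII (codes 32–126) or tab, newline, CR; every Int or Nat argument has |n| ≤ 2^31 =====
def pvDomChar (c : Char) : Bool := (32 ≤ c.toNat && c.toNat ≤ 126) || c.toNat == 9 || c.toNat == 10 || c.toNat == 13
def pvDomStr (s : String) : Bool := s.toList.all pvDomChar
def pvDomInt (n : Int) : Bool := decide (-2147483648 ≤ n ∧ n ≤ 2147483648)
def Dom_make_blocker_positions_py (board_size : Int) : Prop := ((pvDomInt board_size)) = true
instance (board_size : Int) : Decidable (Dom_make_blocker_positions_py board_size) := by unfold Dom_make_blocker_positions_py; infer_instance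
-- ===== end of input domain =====

-- B builds the table in two stages: a first pass computes only each cell's DOWN and RIGHT wall
-- sets; a second pass assembles each cell's direction dict, reading UP from the cell above's
-- DOWN set and LEFT from the left cell's RIGHT set (objective: alternative decomposition).

-- ===== PORT A =====
-- module constants
def UP_py : Int := 0
def RIGHT_py : Int := 1
def DOWN_py : Int := 2
def LEFT_py : Int := 3

-- loop body of A: the inner dict stored at `position`.  Python writes
-- blocker_positions[position] = {} and then mutates that fresh entry in place; ported by
-- building the entry locally (same statements, same order) and storing its final value.
def blockersA (board_size wall_board_size position : Int) : List (Int × List Int) :=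
  let row := PySem.Int.floordiv position board_size
  let col := PySem.Int.mod position board_size
  let d : PySem.Dict Int (PySem.Set Int) := PySem.Dict.empty
  let d :=
    if row ≠ 0 then                                 -- can move up
      let new_row := wall_board_size * (row - 1)
      let s : PySem.Set Int := PySem.Set.empty
      let s := if col ≠ 0 then PySem.Set.add s (new_row + col - 1) else s
      let s := if col ≠ wall_board_size then PySem.Set.add s (new_row + col) else s
      PySem.Dict.insert d UP_py s
    else d
  let d :=
    if col ≠ wall_board_size then                   -- can move right
      let new_row := wall_board_size * row
      let s : PySem.Set Int := PySem.Set.empty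
      let s := if row ≠ 0 then PySem.Set.add s (new_row - wall_board_size + col) else s
      let s := if row ≠ wall_board_size then PySem.Set.add s (new_row + col) else s
      PySem.Dict.insert d RIGHT_py s
    else d
  let d :=
    if row ≠ wall_board_size then                   -- can move down
      let new_row := wall_board_size * row
      let s : PySem.Set Int := PySem.Set.empty
      let s := if col ≠ 0 then PySem.Set.add s (new_row + col - 1) else s
      let s := if col ≠ wall_board_size then PySem.Set.add s (new_row + col) else s
      PySem.Dict.insert d DOWN_py s
    else d
  let d :=
    if col ≠ 0 then                                 -- can move left
      let new_col := col - 1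
      let new_row := wall_board_size * row
      let s : PySem.Set Int := PySem.Set.empty
      let s := if row ≠ 0 then PySem.Set.add s (new_row - wall_board_size + new_col) else s
      let s := if row ≠ wall_board_size then PySem.Set.add s (new_row + new_col) else s
      PySem.Dict.insert d LEFT_py s
    else d
  d.items

def make_blocker_positions_py (board_size : Int) : List (Int × List (Int × List Int)) :=
  let wall_board_size := board_size - 1
  ((PySem.List.pyRange 0 (board_size * board_size) 1).foldl
    (fun blocker_positions position =>
      blocker_positions.insert position (blockersA board_size wall_board_size position))
    (PySem.Dict.empty : PySem.Dict Int (List (Int × List Int)))).items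

-- ===== PORT B =====
-- the DOWN set of cell (row, col): walls below it
def downSetB (w row col : Int) : PySem.Set Int :=
  let s : PySem.Set Int := PySem.Set.empty
  let s := if col ≠ 0 then PySem.Set.add s (w * row + col - 1) else s
  if col ≠ w then PySem.Set.add s (w * row + col) else s

-- the RIGHT set of cell (row, col): walls to its right
def rightSetB (w row col : Int) : PySem.Set Int :=
  let s : PySem.Set Int := PySem.Set.empty
  let s := if row ≠ 0 then PySem.Set.add s (w * (row - 1) + col) else s
  if row ≠ w then PySem.Set.add s (w * row + col) else s

-- stage-1 loop body, `down`-dict component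
def fdB (n w : Int) (d : PySem.Dict Int (PySem.Set Int)) (position : Int) :
    PySem.Dict Int (PySem.Set Int) :=
  let row := PySem.Int.floordiv position n
  let col := PySem.Int.mod position n
  if row ≠ w then d.insert position (downSetB w row col) else d

-- stage-1 loop body, `right`-dict component
def frB (n w : Int) (d : PySem.Dict Int (PySem.Set Int)) (position : Int) :
    PySem.Dict Int (PySem.Set Int) :=
  let row := PySem.Int.floordiv position n
  let col := PySem.Int.mod position n
  if col ≠ w then d.insert position (rightSetB w row col) else d

-- stage-2 loop body: the direction dict of `position`, assembled from the stage-1 dicts.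
-- `down[...]`/`right[...]` are Python subscripts that raise KeyError when missing; getD is
-- their total form — Pre_ excludes exactly the inputs where a lookup would miss.
def cellB (n w : Int) (down right : PySem.Dict Int (PySem.Set Int)) (position : Int) :
    List (Int × List Int) :=
  let row := PySem.Int.floordiv position n
  let col := PySem.Int.mod position n
  let d : PySem.Dict Int (PySem.Set Int) := PySem.Dict.empty
  let d := if row ≠ 0 then d.insert UP_py (down.getD (position - n) PySem.Set.empty) else d
  let d := if col ≠ w then d.insert RIGHT_py (right.getD position PySem.Set.empty) else d
  let d := if row ≠ w then d.insert DOWN_py (down.getD position PySem.Set.empty) else d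
  let d := if col ≠ 0 then d.insert LEFT_py (right.getD (position - 1) PySem.Set.empty) else d
  d.items

def make_blocker_positions_py_alt (board_size : Int) : List (Int × List (Int × List Int)) :=
  let w := board_size - 1
  let dr := (PySem.List.pyRange 0 (board_size * board_size) 1).foldl
    (fun dr position => (fdB board_size w dr.1 position, frB board_size w dr.2 position))
    ((PySem.Dict.empty : PySem.Dict Int (PySem.Set Int)),
     (PySem.Dict.empty : PySem.Dict Int (PySem.Set Int)))
  ((PySem.List.pyRange 0 (board_size * board_size) 1).foldl
    (fun blocker_positions position =>
      blocker_positions.insert position (cellB board_size w dr.1 dr.2 position))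
    (PySem.Dict.empty : PySem.Dict Int (List (Int × List Int)))).items

-- ===== PRECONDITION & SPEC =====
-- Pre_ excludes board_size ≤ -2, where A's floor-division-by-a-negative arithmetic returns
-- accidental entries no caller would specify while B's second pass raises KeyError.
def Pre_make_blocker_positions_py (board_size : Int) : Prop := -1 ≤ board_size
instance (board_size : Int) : Decidable (Pre_make_blocker_positions_py board_size) := by
  unfold Pre_make_blocker_positions_py; infer_instance

def pvWitness_make_blocker_positions_py : Int := 3

def Spec_make_blocker_positions_py (board_size : Int) (out : List (Int × List (Int × List Int))) : Prop := out = make_blocker_positions_py_alt board_size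
instance (board_size : Int) (out : List (Int × List (Int × List Int))) : Decidable (Spec_make_blocker_positions_py board_size out) := by unfold Spec_make_blocker_positions_py; infer_instance

-- ===== CLAIM (what is proved, stated in full; the proofs are below) =====
def Claim_equal_make_blocker_positions_py : Prop := ∀ (board_size : Int), Dom_make_blocker_positions_py board_size → Pre_make_blocker_positions_py board_size → Spec_make_blocker_positions_py board_size (make_blocker_positions_py board_size)

-- ===== LEMMAS AND PROOFS =====

-- A's dict: one insert per position of range(board_size²), all keys fresh and distinct.
theorem pv_A_items (n : Int) :
    make_blocker_positions_py n
      = (PySem.List.pyRange 0 (n * n) 1).map (fun p => (p, blockersA n (n - 1) p)) := by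
  have h := PySem.Dict.items_foldl_insert_fresh (PySem.List.pyRange 0 (n * n) 1)
      (fun p => p) (fun p => blockersA n (n - 1) p)
      (PySem.Dict.empty : PySem.Dict Int (List (Int × List Int)))
      (fun a _ => PySem.Dict.contains_empty a)
      (by simpa using PySem.List.nodup_pyRange_one 0 (n * n))
  simpa [make_blocker_positions_py] using h

-- stage-1 dicts of B, named for the proofs
def downDict (n : Int) : PySem.Dict Int (PySem.Set Int) :=
  (PySem.List.pyRange 0 (n * n) 1).foldl (fdB n (n - 1)) PySem.Dict.empty
def rightDict (n : Int) : PySem.Dict Int (PySem.Set Int) :=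
  (PySem.List.pyRange 0 (n * n) 1).foldl (frB n (n - 1)) PySem.Dict.empty

-- B's pair-state stage-1 fold splits into the two dicts; stage-2 is fresh distinct inserts.
theorem pv_B_items (n : Int) :
    make_blocker_positions_py_alt n
      = (PySem.List.pyRange 0 (n * n) 1).map
          (fun p => (p, cellB n (n - 1) (downDict n) (rightDict n) p)) := by
  have hsplit := PySem.List.foldl_prod_mk (fdB n (n - 1)) (frB n (n - 1))
      (PySem.List.pyRange 0 (n * n) 1) PySem.Dict.empty PySem.Dict.empty
  have h := PySem.Dict.items_foldl_insert_fresh (PySem.List.pyRange 0 (n * n) 1)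
      (fun p => p) (fun p => cellB n (n - 1) (downDict n) (rightDict n) p)
      (PySem.Dict.empty : PySem.Dict Int (List (Int × List Int)))
      (fun a _ => PySem.Dict.contains_empty a)
      (by simpa using PySem.List.nodup_pyRange_one 0 (n * n))
  simpa [make_blocker_positions_py_alt, hsplit, downDict, rightDict] using h

-- lookup in a conditional-insert fold
theorem pv_getD_fold (c : Int → Prop) [DecidablePred c] (f : Int → PySem.Set Int)
    (L : List Int) (d : PySem.Dict Int (PySem.Set Int)) (q : Int) :
    (L.foldl (fun d p => if c p then d.insert p (f p) else d) d).getD q PySem.Set.empty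
      = if q ∈ L ∧ c q then f q else d.getD q PySem.Set.empty := by
  induction L generalizing d with
  | nil => simp
  | cons p L ih =>
    simp only [List.foldl_cons, ih, List.mem_cons]
    by_cases hc : c p
    · rw [if_pos hc, PySem.Dict.getD_insert]
      by_cases hq : q = p
      · subst hq; by_cases hmem : q ∈ L <;> simp [hc, hmem]
      · simp [hq]
    · rw [if_neg hc]
      by_cases hq : q = p
      · subst hq; simp [hc]
      · simp [hq]

theorem downDict_getD (n q : Int) :
    (downDict n).getD q PySem.Set.empty
      = if (0 ≤ q ∧ q < n * n) ∧ ¬ (PySem.Int.floordiv q n = n - 1) then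
          downSetB (n - 1) (PySem.Int.floordiv q n) (PySem.Int.mod q n)
        else PySem.Set.empty := by
  have h := pv_getD_fold (fun p => ¬ (PySem.Int.floordiv p n = n - 1))
      (fun p => downSetB (n - 1) (PySem.Int.floordiv p n) (PySem.Int.mod p n))
      (PySem.List.pyRange 0 (n * n) 1) PySem.Dict.empty q
  simp only [PySem.List.mem_pyRange_one, PySem.Dict.getD_empty] at h
  exact h

theorem rightDict_getD (n q : Int) :
    (rightDict n).getD q PySem.Set.empty
      = if (0 ≤ q ∧ q < n * n) ∧ ¬ (PySem.Int.mod q n = n - 1) then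
          rightSetB (n - 1) (PySem.Int.floordiv q n) (PySem.Int.mod q n)
        else PySem.Set.empty := by
  have h := pv_getD_fold (fun p => ¬ (PySem.Int.mod p n = n - 1))
      (fun p => rightSetB (n - 1) (PySem.Int.floordiv p n) (PySem.Int.mod p n))
      (PySem.List.pyRange 0 (n * n) 1) PySem.Dict.empty q
  simp only [PySem.List.mem_pyRange_one, PySem.Dict.getD_empty] at h
  exact h

-- the heart of the proof: at cell (r, c) both programs build the same entry
set_option maxHeartbeats 1600000 in
theorem pv_cell_eq (n r c : Int) (hn : 0 < n) (hr0 : 0 ≤ r) (hrn : r < n)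
    (hc0 : 0 ≤ c) (hcn : c < n) :
    blockersA n (n - 1) (r * n + c) = cellB n (n - 1) (downDict n) (rightDict n) (r * n + c) := by
  have hdiv : PySem.Int.floordiv (r * n + c) n = r := by
    rw [PySem.Int.floordiv_eq_iff_of_pos hn]; exact ⟨by linarith, by nlinarith⟩
  have hmod : PySem.Int.mod (r * n + c) n = c := by
    have h := PySem.Int.floordiv_mul_add_mod (r * n + c) n
    rw [hdiv] at h; linarith
  have hdivU : PySem.Int.floordiv (r * n + c - n) n = r - 1 := by
    rw [PySem.Int.floordiv_eq_iff_of_pos hn]; constructor <;> nlinarith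
  have hmodU : PySem.Int.mod (r * n + c - n) n = c := by
    have h := PySem.Int.floordiv_mul_add_mod (r * n + c - n) n
    rw [hdivU] at h; nlinarith
  have hmem : (0 ≤ r * n + c ∧ r * n + c < n * n) := ⟨by nlinarith, by nlinarith⟩
  have hU : ((0 ≤ r * n + c - n ∧ r * n + c - n < n * n) ∧ ¬ (r - 1 = n - 1)) ↔ (r ≠ 0) := by
    constructor
    · rintro ⟨⟨h5, _⟩, _⟩ hr; rw [hr] at h5; nlinarith
    · intro hr
      have hr1 : 1 ≤ r := by omega
      exact ⟨⟨by nlinarith, by nlinarith⟩, by omega⟩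
  have hR : ((0 ≤ r * n + c ∧ r * n + c < n * n) ∧ ¬ (c = n - 1)) ↔ (c ≠ n - 1) :=
    ⟨fun h => h.2, fun h => ⟨hmem, h⟩⟩
  have hD : ((0 ≤ r * n + c ∧ r * n + c < n * n) ∧ ¬ (r = n - 1)) ↔ (r ≠ n - 1) :=
    ⟨fun h => h.2, fun h => ⟨hmem, h⟩⟩
  have eR : (n - 1) * r - (n - 1) + c = (n - 1) * (r - 1) + c := by ring
  unfold blockersA cellB
  simp only [downDict_getD, rightDict_getD]
  rw [hdiv, hmod, hdivU, hmodU]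
  by_cases h3 : c = 0
  · simp only [hU, hR, hD]
    rw [eR]
    unfold downSetB rightSetB
    split_ifs <;> first | rfl | omega
  · have hdivL : PySem.Int.floordiv (r * n + c - 1) n = r := by
      rw [PySem.Int.floordiv_eq_iff_of_pos hn]; constructor <;> nlinarith [show 1 ≤ c by omega]
    have hmodL : PySem.Int.mod (r * n + c - 1) n = c - 1 := by
      have h := PySem.Int.floordiv_mul_add_mod (r * n + c - 1) n
      rw [hdivL] at h; nlinarith
    rw [hdivL, hmodL]
    have hL : ((0 ≤ r * n + c - 1 ∧ r * n + c - 1 < n * n) ∧ ¬ (c - 1 = n - 1)) :=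
      ⟨⟨by nlinarith [show 1 ≤ c by omega], by nlinarith⟩, by omega⟩
    rw [if_pos hL]
    have eL : (n - 1) * r - (n - 1) + (c - 1) = (n - 1) * (r - 1) + (c - 1) := by ring
    simp only [hU, hR, hD]
    rw [eR, eL]
    unfold downSetB rightSetB
    split_ifs <;> rfl

-- ===== VERDICT (by name: the statement is the Claim_ definition above) =====
theorem make_blocker_positions_py_spec : Claim_equal_make_blocker_positions_py := by
  intro n _ hpre
  unfold Spec_make_blocker_positions_py
  by_cases hneg : n = -1
  · subst hneg; decide
  · have hn0 : 0 ≤ n := by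
      unfold Pre_make_blocker_positions_py at hpre; omega
    rw [pv_A_items n, pv_B_items n]
    apply List.map_congr_left
    intro p hp
    have hp' := (PySem.List.mem_pyRange_one).1 hp
    have hn : 0 < n := by
      rcases lt_or_eq_of_le hn0 with h | h
      · exact h
      · exfalso; rw [← h] at hp'; omega
    have hc0 := PySem.Int.mod_nonneg p hn
    have hcn := PySem.Int.mod_lt p hn
    have hpe : PySem.Int.floordiv p n * n + PySem.Int.mod p n = p :=
      PySem.Int.floordiv_mul_add_mod p n
    have hr0 : 0 ≤ PySem.Int.floordiv p n := by nlinarith [hp'.1, hp'.2]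
    have hrn : PySem.Int.floordiv p n < n := by nlinarith [hp'.1, hp'.2]
    have := pv_cell_eq n (PySem.Int.floordiv p n) (PySem.Int.mod p n) hn hr0 hrn hc0 hcn
    rw [hpe] at this
    exact congrArg (fun x => (p, x)) this
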